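-- pv_equiv track=rewrite | github.com/lyj555/LICS2021_MRC | evaluate.py | calc_em_score
-- ===== SOURCE A (Python) =====
-- def _normalize(in_str):
--     """
--     normalize the input unicode string
--     """
--     in_str = in_str.lower()
--     sp_char = [
--         u':', u'_', u'`', u'，', u'。', u'：', u'？', u'！', u'(', u')',
--         u'“', u'”', u'；', u'’', u'《', u'》', u'……', u'·', u'、', u',',
--         u'「', u'」', u'（', u'）', u'－', u'～', u'『', u'』', '|'
--     ]
--     out_segs = []
--     for char in in_str:
--         if char in sp_char:
--             continue
--         else:
--             out_segs.append(char)
--     return ''.join(out_segs)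
--
-- def calc_em_score(answers, prediction):
--     """calculate EM score"""
--     em = 0
--     for ans in answers:
--         ans_ = _normalize(ans)
--         prediction_ = _normalize(prediction)
--         if ans_ == prediction_:
--             em = 1
--             break
--     return em
-- ===== SOURCE B (Python) =====
-- SP = set(':_`，。：？！()“”；’《》·、,「」（）－～『』|')
--
-- def _em_equal(a, b):
--     # streaming two-pointer comparison: never builds normalized strings
--     i, j = 0, 0
--     while True:
--         while i < len(a) and a[i].lower() in SP:
--             i += 1
--         while j < len(b) and b[j].lower() in SP:
--             j += 1
--         if i == len(a) or j == len(b):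
--             return i == len(a) and j == len(b)
--         if a[i].lower() != b[j].lower():
--             return False
--         i += 1
--         j += 1
--
-- def calc_em_score(answers, prediction):
--     """calculate EM score"""
--     em = 0
--     for ans in answers:
--         if _em_equal(ans, prediction):
--             em = 1
--             break
--     return em
-- ===== Notes on version B (the rewrite author's own statement) =====
-- stated objective: alternative
-- what changed: B replaces normalize-then-compare (building a filtered lowercase copy of each string and testing string equality) by a streaming two-pointer comparator that walks both raw strings at once, skipping special characters in place and comparing lowercased characters pairwise, allocating no intermediate strings and stopping at the first mismatch.
import Mathlib
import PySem

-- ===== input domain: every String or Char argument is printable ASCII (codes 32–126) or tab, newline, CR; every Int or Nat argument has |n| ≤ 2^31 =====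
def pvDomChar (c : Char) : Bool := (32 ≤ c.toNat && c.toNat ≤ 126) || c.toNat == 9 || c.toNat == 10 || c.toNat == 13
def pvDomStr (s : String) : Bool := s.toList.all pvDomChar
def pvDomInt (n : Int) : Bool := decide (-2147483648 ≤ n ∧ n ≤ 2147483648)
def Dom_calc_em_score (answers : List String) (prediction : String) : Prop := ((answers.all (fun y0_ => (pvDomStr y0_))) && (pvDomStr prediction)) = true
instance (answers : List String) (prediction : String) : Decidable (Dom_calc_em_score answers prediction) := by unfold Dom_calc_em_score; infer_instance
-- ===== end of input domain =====

-- B compares the two raw strings with a streaming two-pointer scan that skips the special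
-- characters in place, instead of building normalized copies and comparing them ('alternative').

-- ===== PORT A =====
def spChar : List String :=
  [":", "_", "`", "，", "。", "：", "？", "！", "(", ")",
   "“", "”", "；", "’", "《", "》", "……", "·", "、", ",",
   "「", "」", "（", "）", "－", "～", "『", "』", "|"]

def normA (in_str : String) : String :=
  let in_str := PySem.Str.lower in_str
  let out_segs : List Char :=
    in_str.toList.foldl (fun segs c => if String.ofList [c] ∈ spChar then segs else segs ++ [c]) []
  PySem.Str.join "" (out_segs.map (fun c => String.ofList [c]))

def emLoopA : List String → String → Int
  | [], _ => 0
  | ans :: rest, p =>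
      let ans_ := normA ans
      let p_ := normA p
      if ans_ = p_ then 1 else emLoopA rest p

def calc_em_score (answers : List String) (prediction : String) : Int :=
  emLoopA answers prediction

-- ===== PORT B =====
def spSet : List Char := ":_`，。：？！()“”；’《》·、,「」（）－～『』|".toList

def isSp (c : Char) : Bool := PySem.Chars.lowerChar c ∈ spSet

-- two-pointer scan, index advance rendered as dropWhile on the list tails
def emEqual (a b : List Char) : Bool :=
  match ha : a.dropWhile isSp, b.dropWhile isSp with
  | [], [] => true
  | [], _ :: _ => false
  | _ :: _, [] => false
  | x :: xs, y :: ys =>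
      PySem.Chars.lowerChar x == PySem.Chars.lowerChar y && emEqual xs ys
termination_by a.length
decreasing_by
  have h := List.length_dropWhile_le isSp a
  rw [ha] at h; simp at h; omega

def emLoopB : List String → String → Int
  | [], _ => 0
  | ans :: rest, p =>
      if emEqual ans.toList p.toList then 1 else emLoopB rest p

def calc_em_score_alt (answers : List String) (prediction : String) : Int :=
  emLoopB answers prediction

-- ===== PRECONDITION & SPEC =====
def Spec_calc_em_score (answers : List String) (prediction : String) (out : Int) : Prop := out = calc_em_score_alt answers prediction
instance (answers : List String) (prediction : String) (out : Int) : Decidable (Spec_calc_em_score answers prediction out) := by unfold Spec_calc_em_score; infer_instance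

-- ===== CLAIM =====
def Claim_equal_calc_em_score : Prop := ∀ (answers : List String) (prediction : String), Dom_calc_em_score answers prediction → Spec_calc_em_score answers prediction (calc_em_score answers prediction)

-- ===== LEMMAS AND PROOFS =====

def cleanL (l : List Char) : List Char :=
  (l.map PySem.Chars.lowerChar).filter (fun c => !(c ∈ spSet))

lemma mem_spChar (c : Char) : (String.ofList [c] ∈ spChar) ↔ c ∈ spSet := by
  simp [spChar, spSet, String.ext_iff]

lemma normA_eq (s : String) : normA s = String.ofList (cleanL s.toList) := by
  unfold normA cleanL
  rw [String.ext_iff]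
  simp only [show (fun (segs : List Char) c => if String.ofList [c] ∈ spChar then segs else segs ++ [c])
      = (fun segs c => if String.ofList [c] ∉ spChar then segs ++ [c] else segs) from by
    funext segs c; by_cases h : String.ofList [c] ∈ spChar <;> simp [h]]
  rw [PySem.List.foldl_append_ite_eq_filter]
  simp only [PySem.Str.toList_join, List.map_map, Function.comp_def,
    String.toList_ofList, String.toList_empty, List.nil_append]
  rw [PySem.Chars.join_nil_singletons]
  congr 1
  · funext c; simp [mem_spChar]
  · rw [PySem.Str.toList_lower]; simp [PySem.Chars.lower]

lemma cleanL_dropWhile (l : List Char) : cleanL (l.dropWhile isSp) = cleanL l := by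
  induction l with
  | nil => rfl
  | cons c t ih =>
      by_cases h : isSp c = true
      · have : PySem.Chars.lowerChar c ∈ spSet := by simpa [isSp] using h
        simp [List.dropWhile, h, cleanL, this, cleanL] at *
        simpa [cleanL] using ih
      · simp [List.dropWhile, h]

lemma dropWhile_head_false {p : Char → Bool} {l : List Char} {x : Char} {xs : List Char}
    (h : l.dropWhile p = x :: xs) : p x = false := by
  induction l with
  | nil => simp at h
  | cons c t ih =>
      by_cases hc : p c = true
      · rw [List.dropWhile_cons_of_pos hc] at h; exact ih h
      · rw [List.dropWhile_cons_of_neg hc] at h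
        cases h; simpa using hc

lemma cleanL_cons_of_not_sp {y : Char} {ys : List Char} (hy : isSp y = false) :
    cleanL (y :: ys) = PySem.Chars.lowerChar y :: cleanL ys := by
  have : ¬ (PySem.Chars.lowerChar y ∈ spSet) := by simpa [isSp] using hy
  simp [cleanL, this]

lemma emEqual_eq (a b : List Char) : emEqual a b = (cleanL a == cleanL b) := by
  fun_induction emEqual a b with
  | case1 a b ha hb =>
      rw [← cleanL_dropWhile a, ← cleanL_dropWhile b, ha, hb]; rfl
  | case2 a b y ys ha hb =>
      rw [← cleanL_dropWhile a, ← cleanL_dropWhile b, ha, hb,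
        cleanL_cons_of_not_sp (dropWhile_head_false hb)]
      simp [cleanL]
  | case3 a b x xs ha hb =>
      rw [← cleanL_dropWhile a, ← cleanL_dropWhile b, ha, hb,
        cleanL_cons_of_not_sp (dropWhile_head_false ha)]
      simp [cleanL]
  | case4 a b x xs y ys ha hb ih =>
      rw [← cleanL_dropWhile a, ← cleanL_dropWhile b, ha, hb,
        cleanL_cons_of_not_sp (dropWhile_head_false ha),
        cleanL_cons_of_not_sp (dropWhile_head_false hb), ih]
      simp [Bool.and_comm]

lemma norm_eq_emEqual (x p : String) :
    (normA x = normA p) ↔ emEqual x.toList p.toList = true := by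
  rw [normA_eq, normA_eq, emEqual_eq]
  constructor
  · intro h; simp [String.ext_iff] at h; simp [h]
  · intro h; simp at h; simp [h]

theorem calc_em_score_spec_aux (answers : List String) (prediction : String) :
    calc_em_score answers prediction = calc_em_score_alt answers prediction := by
  unfold calc_em_score calc_em_score_alt
  induction answers with
  | nil => rfl
  | cons a rest ih =>
      simp only [emLoopA, emLoopB]
      by_cases h : normA a = normA prediction
      · simp [h, (norm_eq_emEqual a prediction).mp h]
      · have h2 : ¬ emEqual a.toList prediction.toList = true := fun hc =>
          h ((norm_eq_emEqual a prediction).mpr hc)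
        simp [h, h2, ih]

-- ===== VERDICT =====
theorem calc_em_score_spec : Claim_equal_calc_em_score := by
  intro answers prediction _
  exact calc_em_score_spec_aux answers prediction
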